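-- pv_equiv track=rewrite | github.com/missing-semicolon/advent-of-code-2018 | day02_inventory_management.py | check_for_repeats
-- ===== SOURCE A (Python) =====
-- def check_for_repeats(box):
--     counter = dict()
--     for char in box:
--         if char in counter.keys():
--             counter[char] += 1
--         else:
--             counter[char] = 1
--
--     has_two, has_three = False, False
--     for k, v in counter.items():
--         if v == 2:
--             has_two = True
--         elif v == 3:
--             has_three = True
--
--     return has_two, has_three
-- ===== SOURCE B (Python) =====
-- def check_for_repeats(box):
--     s = sorted(box)
--     has_two, has_three = False, False
--     n = len(s)
--     i = 0
--     while i < n: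
--         j = i + 1
--         while j < n and s[j] == s[i]:
--             j += 1
--         run = j - i
--         if run == 2:
--             has_two = True
--         elif run == 3:
--             has_three = True
--         i = j
--     return has_two, has_three
-- ===== Notes on version B (the rewrite author's own statement) =====
-- stated objective: alternative
-- what changed: Replaces the hash-counter build plus items scan with sort-then-run-length: sort the characters and walk consecutive equal runs, flagging run lengths 2 and 3 as they are measured.
import Mathlib
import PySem

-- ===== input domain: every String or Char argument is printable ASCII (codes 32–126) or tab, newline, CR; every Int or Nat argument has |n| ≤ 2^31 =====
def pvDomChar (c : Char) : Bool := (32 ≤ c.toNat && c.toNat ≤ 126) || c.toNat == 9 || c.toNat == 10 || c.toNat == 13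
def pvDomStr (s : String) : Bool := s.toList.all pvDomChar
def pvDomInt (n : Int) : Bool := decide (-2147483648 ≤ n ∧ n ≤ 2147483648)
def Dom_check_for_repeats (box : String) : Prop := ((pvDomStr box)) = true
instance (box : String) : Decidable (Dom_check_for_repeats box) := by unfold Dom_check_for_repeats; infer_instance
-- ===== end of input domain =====

-- B replaces A's hash-counter build + items scan with sort-then-run-length scanning (alternative decomposition, no frequency table).

-- ===== PORT A =====
def check_for_repeats (box : String) : Bool × Bool :=
  let counter : PySem.Dict Char Int :=
    box.toList.foldl (fun d c =>
      if d.contains c then d.insert c (d.getD c 0 + 1) else d.insert c 1)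
      PySem.Dict.empty
  let ht : Bool × Bool :=
    counter.items.foldl (fun p kv =>
      if kv.2 = (2 : Int) then (true, p.2)
      else if kv.2 = (3 : Int) then (p.1, true)
      else p) (false, false)
  ht

-- ===== PORT B =====
-- Source B's outer while loop over runs of the sorted list; the inner while that
-- advances j over the current run is the takeWhile/dropWhile split.
def pvRunScan : List Char → Bool → Bool → Bool × Bool
  | [], h2, h3 => (h2, h3)
  | c :: rest, h2, h3 =>
    let run := 1 + (rest.takeWhile (· == c)).length
    if run = 2 then pvRunScan (rest.dropWhile (· == c)) true h3
    else if run = 3 then pvRunScan (rest.dropWhile (· == c)) h2 true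
    else pvRunScan (rest.dropWhile (· == c)) h2 h3
  termination_by l => l.length
  decreasing_by all_goals
    exact Nat.lt_succ_of_le (List.length_dropWhile_le _ _)

def check_for_repeats_alt (box : String) : Bool × Bool :=
  pvRunScan (PySem.List.sorted box.toList (fun c => c) false) false false

-- ===== PRECONDITION & SPEC =====
def Spec_check_for_repeats (box : String) (out : Bool × Bool) : Prop := out = check_for_repeats_alt box
instance (box : String) (out : Bool × Bool) : Decidable (Spec_check_for_repeats box out) := by unfold Spec_check_for_repeats; infer_instance

-- ===== CLAIM (what is proved, stated in full; the proofs are below) =====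
def Claim_equal_check_for_repeats : Prop := ∀ (box : String), Dom_check_for_repeats box → Spec_check_for_repeats box (check_for_repeats box)

-- ===== LEMMAS AND PROOFS =====

-- A's build step equals the canonical counter step (the else branch inserts 1 = getD+1 on a fresh key).
theorem pv_build_eq_counter (l : List Char) :
    l.foldl (fun d c =>
      if d.contains c then d.insert c (d.getD c 0 + 1) else d.insert c 1)
      PySem.Dict.empty = PySem.Dict.counter l := by
  rw [← PySem.Dict.foldl_insert_getD_add_one_eq_counter]
  have h : (fun (d : PySem.Dict Char Int) c =>
      if d.contains c then d.insert c (d.getD c 0 + 1) else d.insert c 1)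
      = fun d c => d.insert c (d.getD c 0 + 1) := by
    funext d c
    by_cases hc : d.contains c = true
    · simp [hc]
    · simp only [Bool.not_eq_true] at hc
      have hg : d.getD c 0 = 0 := PySem.Dict.getD_of_not_contains d 0 hc
      simp [hc, hg]
  rw [h]

-- The elif scan over item pairs computes (b ∨ ∃ v=2, t ∨ ∃ v=3).
theorem pv_scan_eq_any (ps : List (Char × Int)) (b t : Bool) :
    ps.foldl (fun p kv =>
      if kv.2 = (2 : Int) then (true, p.2)
      else if kv.2 = (3 : Int) then (p.1, true)
      else p) (b, t)
    = (b || ps.any (fun kv => kv.2 == 2), t || ps.any (fun kv => kv.2 == 3)) := by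
  induction ps generalizing b t with
  | nil => simp
  | cons kv ps ih =>
    by_cases h2 : kv.2 = (2 : Int)
    · simp [List.foldl_cons, h2, ih]
    · by_cases h3 : kv.2 = (3 : Int)
      · simp [List.foldl_cons, h3, ih]
      · have e2 : (kv.2 == (2 : Int)) = false := by simp [h2]
        have e3 : (kv.2 == (3 : Int)) = false := by simp [h3]
        simp [List.foldl_cons, h2, h3, ih, e2, e3]

-- any over the counter's items testing the value = "some character of l occurs exactly k times in l"
theorem pv_any_items (l : List Char) (k : Nat) :
    ((PySem.Dict.counter l).items.any (fun kv => kv.2 == (k : Int)))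
      = l.any (fun c => l.count c == k) := by
  rw [PySem.Dict.items_counter, Bool.eq_iff_iff]
  simp only [List.any_map, List.any_eq_true, Function.comp, beq_iff_eq]
  constructor
  · rintro ⟨c, hc, h⟩
    exact ⟨c, (PySem.Set.mem_ofList l c).mp hc, by exact_mod_cast h⟩
  · rintro ⟨c, hc, h⟩
    exact ⟨c, (PySem.Set.mem_ofList l c).mpr hc, by exact_mod_cast h⟩

-- in a list ordered by ≤ whose elements are all ≥ c, dropping the leading run of c leaves no c
theorem pv_dropWhile_not_mem (c : Char) (l : List Char)
    (hp : l.Pairwise (fun a b => a ≤ b)) (hge : ∀ x ∈ l, c ≤ x) :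
    ∀ x ∈ l.dropWhile (· == c), x ≠ c := by
  induction l with
  | nil => simp
  | cons r rs ih =>
    rw [List.dropWhile_cons]
    by_cases hr : (r == c) = true
    · rw [if_pos hr]
      exact ih hp.of_cons (fun x hx => hge x (List.mem_cons_of_mem _ hx))
    · rw [if_neg hr]
      simp only [beq_iff_eq] at hr
      have hcr : c < r := lt_of_le_of_ne (hge r (List.mem_cons_self)) (Ne.symm hr)
      intro x hx
      rcases List.mem_cons.mp hx with h | h
      · exact h ▸ hr
      · exact ne_of_gt (lt_of_lt_of_le hcr ((List.pairwise_cons.mp hp).1 x h))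

-- the run-length scan on an ordered list computes the two "some count equals k" flags
theorem pv_runScan_eq (l : List Char) (h2 h3 : Bool)
    (hp : l.Pairwise (fun a b => a ≤ b)) :
    pvRunScan l h2 h3 =
      (h2 || l.any (fun c => l.count c == 2), h3 || l.any (fun c => l.count c == 3)) := by
  induction l, h2, h3 using pvRunScan.induct with
  | case1 h2 h3 => simp [pvRunScan]
  | case2 c rest h2 h3 run hrun ih | case3 c rest h2 h3 run hrun hrun3 ih
  | case4 c rest h2 h3 run hrun hrun3 ih =>
    -- common decomposition facts
    have hsplit : rest = rest.takeWhile (· == c) ++ rest.dropWhile (· == c) :=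
      (List.takeWhile_append_dropWhile).symm
    have hr : run = 1 + (rest.takeWhile (· == c)).length := rfl
    rw [hr] at hrun
    try rw [hr] at hrun3
    clear hr
    have hge : ∀ x ∈ rest, c ≤ x := fun x hx => (List.pairwise_cons.mp hp).1 x hx
    have htake : ∀ x ∈ rest.takeWhile (· == c), x = c := by
      intro x hx
      have h := List.mem_takeWhile_imp hx
      exact beq_iff_eq.mp h
    have hdrop : ∀ x ∈ rest.dropWhile (· == c), x ≠ c :=
      pv_dropWhile_not_mem c rest hp.of_cons hge
    have hpd : (rest.dropWhile (· == c)).Pairwise (fun a b => a ≤ b) :=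
      hp.of_cons.sublist (List.dropWhile_sublist _)
    -- count of c in the whole list is the run length
    have hct : (rest.takeWhile (· == c)).count c = (rest.takeWhile (· == c)).length :=
      List.count_eq_length.mpr (fun b hb => (htake b hb).symm)
    have hcd : (rest.dropWhile (· == c)).count c = 0 :=
      List.count_eq_zero.mpr (fun h => hdrop c h rfl)
    have hcount_c : (c :: rest).count c = 1 + (rest.takeWhile (· == c)).length := by
      rw [List.count_cons_self]
      conv_lhs => rw [hsplit]
      rw [List.count_append, hct, hcd]; omega
    -- counts of drop-part elements are unchanged
    have hcount_d : ∀ x ∈ rest.dropWhile (· == c),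
        (c :: rest).count x = (rest.dropWhile (· == c)).count x := by
      intro x hx
      have hxc : x ≠ c := hdrop x hx
      have hxt : (rest.takeWhile (· == c)).count x = 0 :=
        List.count_eq_zero.mpr (fun h => hxc (htake x h))
      rw [List.count_cons_of_ne (Ne.symm hxc)]
      conv_lhs => rw [hsplit]
      rw [List.count_append, hxt]; omega
    -- any over the whole list splits into the run test and any over the drop part
    have hany : ∀ k : Nat, (c :: rest).any (fun x => (c :: rest).count x == k)
        = (((1 + (rest.takeWhile (· == c)).length : Nat) == k) ||
           (rest.dropWhile (· == c)).any
             (fun x => (rest.dropWhile (· == c)).count x == k)) := by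
      intro k
      rw [Bool.eq_iff_iff]
      simp only [List.any_eq_true, Bool.or_eq_true, beq_iff_eq]
      constructor
      · rintro ⟨x, hx, hxk⟩
        rcases List.mem_cons.mp hx with h | h
        · left; rw [← hxk, h, hcount_c]
        · rw [hsplit] at h
          rcases List.mem_append.mp h with h | h
          · left; rw [← hxk, htake x h, hcount_c]
          · right; exact ⟨x, h, by rw [← hcount_d x h]; exact hxk⟩
      · rintro h
        rcases h with h | ⟨x, hx, hxk⟩
        · exact ⟨c, List.mem_cons_self, by rw [hcount_c, h]⟩
        · refine ⟨x, ?_, by rw [hcount_d x hx]; exact hxk⟩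
          exact List.mem_cons_of_mem _ ((List.dropWhile_sublist _).mem hx)
    rw [show pvRunScan (c :: rest) h2 h3 =
        (if 1 + (rest.takeWhile (· == c)).length = 2 then
          pvRunScan (rest.dropWhile (· == c)) true h3
        else if 1 + (rest.takeWhile (· == c)).length = 3 then
          pvRunScan (rest.dropWhile (· == c)) h2 true
        else pvRunScan (rest.dropWhile (· == c)) h2 h3) from by rw [pvRunScan]]
    rw [hany 2, hany 3]
    first
    | -- run = 2
      (rw [if_pos hrun, ih hpd]
       have e2 : ((1 + (rest.takeWhile (· == c)).length : Nat) == 2) = true := by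
         simp [hrun]
       have e3 : ((1 + (rest.takeWhile (· == c)).length : Nat) == 3) = false := by
         simp; omega
       simp [e2, e3])
    | -- run = 3
      (rw [if_neg hrun, if_pos hrun3, ih hpd]
       have e2 : ((1 + (rest.takeWhile (· == c)).length : Nat) == 2) = false := by
         simp [hrun]
       have e3 : ((1 + (rest.takeWhile (· == c)).length : Nat) == 3) = true := by
         simp [hrun3]
       simp [e2, e3])
    | -- other run lengths
      (rw [if_neg hrun, if_neg hrun3, ih hpd]
       have e2 : ((1 + (rest.takeWhile (· == c)).length : Nat) == 2) = false := by
         simp [hrun]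
       have e3 : ((1 + (rest.takeWhile (· == c)).length : Nat) == 3) = false := by
         simp [hrun3]
       simp [e2, e3])

-- ===== VERDICT (by name: the statement is the Claim_ definition above) =====
theorem check_for_repeats_spec : Claim_equal_check_for_repeats := by
  intro box _
  unfold Spec_check_for_repeats check_for_repeats check_for_repeats_alt
  simp only [pv_build_eq_counter, pv_scan_eq_any, Bool.false_or]
  rw [pv_runScan_eq _ _ _ (PySem.List.sorted_pairwise box.toList (fun c => c) )]
  have hperm := PySem.List.sorted_perm box.toList (fun c : Char => c) false
  have hcnt : ∀ x, (PySem.List.sorted box.toList (fun c : Char => c) false).count x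
      = box.toList.count x := fun x => hperm.count_eq x
  have hany : ∀ k : Nat,
      (PySem.List.sorted box.toList (fun c : Char => c) false).any
        (fun c => (PySem.List.sorted box.toList (fun c : Char => c) false).count c == k)
      = box.toList.any (fun c => box.toList.count c == k) := by
    intro k
    rw [Bool.eq_iff_iff]
    simp only [List.any_eq_true, PySem.List.mem_sorted, hcnt]
  have i2 := pv_any_items box.toList 2
  have i3 := pv_any_items box.toList 3
  push_cast at i2 i3
  rw [Bool.false_or, Bool.false_or, hany 2, hany 3, i2, i3]
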